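-- pv_equiv track=rewrite | github.com/Drake3001/FuelShare | database/crud.py | reevaluate_periods
-- ===== SOURCE A (Python) =====
-- def reevaluate_periods( trip_ids:[(int, str)], start_period: int):
--     period= start_period
--     result = []
--     for (trip_id, refuel) in trip_ids:
--         if refuel:
--             period += 1
--         result.append({"id": trip_id, "period": period})
--     return result
-- ===== SOURCE B (Python) =====
-- def reevaluate_periods(trip_ids: [(int, str)], start_period: int):
--     if not trip_ids:
--         return []
--     (trip_id, refuel) = trip_ids[0]
--     period = start_period + (1 if refuel else 0)
--     return [{"id": trip_id, "period": period}] + reevaluate_periods(trip_ids[1:], period)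
-- ===== Notes on version B (the rewrite author's own statement) =====
-- stated objective: alternative
-- what changed: Replaces the stateful loop with a mutable period accumulator and result.append by a structural recursion on the trip list that threads the updated period into the recursive call and builds the output by consing.
import Mathlib
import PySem

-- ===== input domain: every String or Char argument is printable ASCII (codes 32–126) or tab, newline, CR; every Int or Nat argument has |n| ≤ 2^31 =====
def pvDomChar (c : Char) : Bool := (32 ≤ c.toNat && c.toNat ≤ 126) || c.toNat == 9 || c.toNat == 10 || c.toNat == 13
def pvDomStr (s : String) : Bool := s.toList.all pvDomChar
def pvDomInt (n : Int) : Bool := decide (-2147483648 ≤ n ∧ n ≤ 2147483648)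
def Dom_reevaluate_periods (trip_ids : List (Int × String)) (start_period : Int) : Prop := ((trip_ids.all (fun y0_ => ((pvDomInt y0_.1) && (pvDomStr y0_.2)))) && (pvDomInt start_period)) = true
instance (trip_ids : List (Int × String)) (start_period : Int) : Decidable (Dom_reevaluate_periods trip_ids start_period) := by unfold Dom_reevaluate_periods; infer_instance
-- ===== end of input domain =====

-- B replaces A's stateful accumulator loop by a structural recursion that threads the
-- updated period into the recursive call (objective: alternative decomposition).

-- ===== PORT A =====
-- A: loop with mutable `period` and `result.append`; ported as a foldl over (period, result).
def reevaluate_periods (trip_ids : List (Int × String)) (start_period : Int) : List (List (String × Int)) :=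
  (trip_ids.foldl
    (fun (st : Int × List (List (String × Int))) tp =>
      let period : Int := if tp.2 ≠ "" then st.1 + 1 else st.1
      (period, st.2 ++ [[("id", tp.1), ("period", period)]]))
    (start_period, [])).2

-- ===== PORT B =====
-- B: structural recursion, consing each row and passing the updated period down.
def reevaluate_periods_alt (trip_ids : List (Int × String)) (start_period : Int) : List (List (String × Int)) :=
  match trip_ids with
  | [] => []
  | (trip_id, refuel) :: rest =>
    let period : Int := start_period + (if refuel ≠ "" then 1 else 0)
    [("id", trip_id), ("period", period)] :: reevaluate_periods_alt rest period

-- ===== PRECONDITION & SPEC =====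
def Spec_reevaluate_periods (trip_ids : List (Int × String)) (start_period : Int) (out : List (List (String × Int))) : Prop := out = reevaluate_periods_alt trip_ids start_period
instance (trip_ids : List (Int × String)) (start_period : Int) (out : List (List (String × Int))) : Decidable (Spec_reevaluate_periods trip_ids start_period out) := by unfold Spec_reevaluate_periods; infer_instance

-- ===== CLAIM (what is proved, stated in full; the proofs are below) =====
def Claim_equal_reevaluate_periods : Prop := ∀ (trip_ids : List (Int × String)) (start_period : Int), Dom_reevaluate_periods trip_ids start_period → Spec_reevaluate_periods trip_ids start_period (reevaluate_periods trip_ids start_period)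

-- ===== LEMMAS AND PROOFS =====
theorem reevaluate_periods_foldl (trip_ids : List (Int × String)) :
    ∀ (p : Int) (acc : List (List (String × Int))),
    (trip_ids.foldl
      (fun (st : Int × List (List (String × Int))) tp =>
        let period : Int := if tp.2 ≠ "" then st.1 + 1 else st.1
        (period, st.2 ++ [[("id", tp.1), ("period", period)]]))
      (p, acc)).2 = acc ++ reevaluate_periods_alt trip_ids p := by
  induction trip_ids with
  | nil => intro p acc; simp [reevaluate_periods_alt]
  | cons hd tl ih =>
    intro p acc
    obtain ⟨tid, refuel⟩ := hd
    simp only [List.foldl_cons]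
    refine (ih _ _).trans ?_
    simp [reevaluate_periods_alt]
    exact ⟨by split <;> omega, by split <;> norm_num⟩

-- ===== VERDICT (by name: the statement is the Claim_ definition above) =====
theorem reevaluate_periods_spec : Claim_equal_reevaluate_periods := by
  intro trip_ids start_period _
  unfold Spec_reevaluate_periods reevaluate_periods
  simpa using reevaluate_periods_foldl trip_ids start_period []
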